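-- pv_equiv track=rewrite | github.com/cmburgul/phonenumber-words | phonenumber-words.py | get_substrs
-- ===== SOURCE A (Python) =====
-- def get_substrs(string, min_substr_len = 1):
--     # substrs is a set to collect all substrings
--     substrs = set()
--
--     # Get all the substrings
--     for i in range(len(string)):
--         for j in range(i+min_substr_len, len(string)+1):
--             substrs = substrs.union([string[i:j]])
--
--     # Split the zeros and ones in the substring
--     for substr in substrs.copy():
--         if ("0" in substr) or ("1" in substr):
--             substrs.remove(substr)
--             substrs = substrs.union(substr.replace("0", "1").split("1"))
--     return substrs
-- ===== SOURCE B (Python) =====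
-- def _next01(string, t):
--     # first position >= t holding '0' or '1' (len(string) if there is none)
--     while t < len(string) and string[t] not in "01":
--         t += 1
--     return t
--
-- def get_substrs(string, min_substr_len = 1):
--     # Next-digit-pointer algorithm (requires min_substr_len >= 0): per start i
--     # the clean substrings are the contiguous j-range up to the next '0'/'1'
--     # (no per-substring containment test; the pointer only moves forward, so
--     # it costs O(n) overall), and the split-out fragments are sliced out
--     # directly at digit positions: one walk builds the fragments of the first
--     # dirty window, and each wider window only contributes its final fragment
--     # string[last+1:j] via a maintained last-digit pointer -- no replace/split
--     # calls, no per-substring rewriting pass, everything deduped on the fly.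
--     n = len(string)
--     clean = set()
--     pieces = set()
--     t = _next01(string, 0)
--     for i in range(n):
--         if t < i:
--             t = _next01(string, i)
--         for j in range(i + min_substr_len, t + 1):
--             clean.add(string[i:j])
--         j0 = max(t + 1, i + min_substr_len)
--         if t < n and j0 <= n:
--             # fragments of the first dirty window string[i:j0]
--             prev = i
--             for k in range(i, j0):
--                 if string[k] in "01":
--                     pieces.add(string[prev:k])
--                     prev = k + 1
--             pieces.add(string[prev:j0])
--             last = prev - 1            # last digit position in [i, j0)
--             # each wider window only renews its final fragment
--             for j in range(j0 + 1, n + 1):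
--                 if string[j - 1] in "01":
--                     last = j - 1
--                     pieces.add("")
--                 else:
--                     pieces.add(string[last + 1:j])
--     return clean | pieces
-- ===== Notes on version B (the rewrite author's own statement) =====
-- stated objective: faster
-- what changed: Replaces A's enumerate-every-substring-then-split-each-dirty-one scheme (with a fresh full-set copy per substring via set.union) by a next-digit-pointer algorithm: per start position the clean substrings are one contiguous j-range ending at the precomputed next '0'/'1' position, the fragments of the first dirty window are sliced out at the digit positions in a single walk, and every wider window contributes only its final fragment string[last+1:j] via a maintained last-digit pointer, with one dedup at the end -- no replace/split calls and no second rewriting pass.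
-- outside the precondition, e.g. on get_substrs('a0b', -2): A returns {'', 'a', 'b'}, B returns {'', '0', 'a0', 'b', 'a'}
import Mathlib
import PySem

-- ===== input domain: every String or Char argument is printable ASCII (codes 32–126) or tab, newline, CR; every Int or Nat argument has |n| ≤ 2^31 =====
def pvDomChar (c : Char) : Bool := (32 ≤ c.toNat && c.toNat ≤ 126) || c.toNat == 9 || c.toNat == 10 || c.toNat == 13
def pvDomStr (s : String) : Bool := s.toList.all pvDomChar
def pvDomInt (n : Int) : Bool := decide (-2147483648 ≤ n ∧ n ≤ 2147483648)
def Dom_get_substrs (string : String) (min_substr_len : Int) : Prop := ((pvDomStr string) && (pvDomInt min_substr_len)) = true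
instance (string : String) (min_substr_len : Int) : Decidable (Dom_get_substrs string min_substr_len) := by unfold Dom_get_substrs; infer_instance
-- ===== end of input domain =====

-- B replaces A's two-phase enumerate-then-split-every-substring scheme by a next-digit pointer
-- algorithm that slices the fragments out directly (one walk per start position plus a maintained
-- last-digit pointer); return-value equivalence only, proved for min_substr_len ≥ 0.

-- ===== PORT A =====
-- shared helper: the exact expression sub.replace("0","1").split("1") occurring in A's Python;
-- split? with the nonempty separator "1" is some (Chars.splitOn …), so this is exact
def pvPieces (sub : String) : List String :=
  (PySem.Chars.splitOn (PySem.Str.replace sub "0" "1").toList "1".toList).map String.ofList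

def get_substrs (string : String) (min_substr_len : Int) : List String :=
  let substrs : PySem.Set String :=
    (PySem.List.pyRange 0 (PySem.Str.len string) 1).foldl (fun substrs i =>
      (PySem.List.pyRange (i + min_substr_len) (PySem.Str.len string + 1) 1).foldl (fun substrs j =>
        PySem.Set.union substrs [PySem.Str.slice string (some i) (some j)]) substrs)
      PySem.Set.empty
  -- for substr in substrs.copy(): the copy is the list substrs itself; substrs.remove(substr) never
  -- raises here (each element of the copy is still present when it is reached), so Set.discard is exact
  substrs.foldl (fun substrs substr =>
    if PySem.Str.isIn "0" substr || PySem.Str.isIn "1" substr then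
      PySem.Set.union (PySem.Set.discard substrs substr) (pvPieces substr)
    else substrs) substrs

-- ===== PORT B =====
-- string[k] in "01" (B only evaluates it at indices 0 ≤ k < len(string), where pyGet? is some)
def pvDig (string : String) (k : Int) : Bool :=
  ((PySem.Str.pyGet? string k).map (fun c => c == '0' || c == '1')).getD false

-- helper _next01: while t < len(string) and string[t] not in "01": t += 1
def pvNext01 (string : String) (t : Int) : Int :=
  if h : t < PySem.Str.len string ∧ pvDig string t = false then pvNext01 string (t + 1) else t
termination_by (PySem.Str.len string - t).toNat
decreasing_by
  obtain ⟨h1, -⟩ := h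
  omega

def get_substrs_alt (string : String) (min_substr_len : Int) : List String :=
  let n := PySem.Str.len string
  let cp := (PySem.List.pyRange 0 n 1).foldl (fun (cp : List String × List String) i =>
    let t := pvNext01 string i
    let clean := (PySem.List.pyRange (i + min_substr_len) (t + 1) 1).foldl
      (fun cl j => cl ++ [PySem.Str.slice string (some i) (some j)]) cp.1
    let j0 := max (t + 1) (i + min_substr_len)
    if t < n ∧ j0 ≤ n then
      -- fragments of the first dirty window string[i:j0], sliced at the digit positions
      let pk := (PySem.List.pyRange i j0 1).foldl
        (fun (pk : List String × Int) k =>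
          if pvDig string k then (pk.1 ++ [PySem.Str.slice string (some pk.2) (some k)], k + 1)
          else pk)
        (cp.2, i)
      let pieces := pk.1 ++ [PySem.Str.slice string (some pk.2) (some j0)]
      -- each wider window only renews its final fragment string[last+1:j]
      let pl := (PySem.List.pyRange (j0 + 1) (n + 1) 1).foldl
        (fun (pl : List String × Int) j =>
          if pvDig string (j - 1) then (pl.1 ++ [""], j - 1)
          else (pl.1 ++ [PySem.Str.slice string (some (pl.2 + 1)) (some j)], pl.2))
        (pieces, pk.2 - 1)
      (clean, pl.1)
    else (clean, cp.2)) ([], [])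
  PySem.Set.ofList (cp.1 ++ cp.2)

-- ===== PRECONDITION & SPEC =====
-- Pre_ restricts to the natural domain of a minimum-length parameter: min_substr_len ≥ 0. For
-- negative values A's j-range produces negative slice bounds, which Python reads from the END of
-- the string, and B makes no attempt to mirror that wraparound.
def Pre_get_substrs (string : String) (min_substr_len : Int) : Prop := 0 ≤ min_substr_len
instance (string : String) (min_substr_len : Int) : Decidable (Pre_get_substrs string min_substr_len) := by unfold Pre_get_substrs; infer_instance
def pvWitness_get_substrs : String × Int := ("0ab1", 1)

def Spec_get_substrs (string : String) (min_substr_len : Int) (out : List String) : Prop := out = get_substrs_alt string min_substr_len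
instance (string : String) (min_substr_len : Int) (out : List String) : Decidable (Spec_get_substrs string min_substr_len out) := by unfold Spec_get_substrs; infer_instance

-- ===== CLAIM (what is proved, stated in full; the proofs are below) =====
def Claim_equal_get_substrs : Prop := ∀ (string : String) (min_substr_len : Int), Dom_get_substrs string min_substr_len → Pre_get_substrs string min_substr_len → Spec_get_substrs string min_substr_len (get_substrs string min_substr_len)

-- ===== LEMMAS AND PROOFS =====

-- ---------- generic first-occurrence dedup (the list behind Python's set-building) ----------
def sd : List String → List String
  | [] => []
  | x :: xs => x :: (sd xs).filter (fun y => decide (y ≠ x))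

lemma mem_sd {y : String} : ∀ {L : List String}, y ∈ sd L ↔ y ∈ L := by
  intro L
  induction L with
  | nil => simp [sd]
  | cons x xs ih =>
    by_cases h : y = x
    · simp [sd, h]
    · simp [sd, List.mem_filter, h, ih]

lemma sd_filter (p : String → Bool) : ∀ (L : List String), (sd L).filter p = sd (L.filter p) := by
  intro L
  induction L with
  | nil => simp [sd]
  | cons x xs ih =>
    by_cases h : p x
    · rw [sd, List.filter_cons_of_pos h, List.filter_cons_of_pos h, sd,
        List.filter_comm, ih]
    · rw [sd, List.filter_cons_of_neg h, List.filter_cons_of_neg h,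
        List.filter_comm, ih]
      apply List.filter_eq_self.mpr
      intro a ha
      rw [mem_sd, List.mem_filter] at ha
      simp only [decide_eq_true_eq]
      rintro rfl
      rw [ha.2] at h
      exact h rfl

lemma sd_nodup : ∀ (L : List String), (sd L).Nodup := by
  intro L
  induction L with
  | nil => simp [sd]
  | cons x xs ih =>
    rw [sd, List.nodup_cons]
    refine ⟨?_, ih.filter _⟩
    simp [List.mem_filter]

lemma foldl_add_eq (t : List String) : ∀ s : List String,
    List.foldl PySem.Set.add s t = s ++ sd (t.filter (fun y => decide (y ∉ s))) := by
  induction t with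
  | nil => intro s; simp [sd]
  | cons x t ih =>
    intro s
    by_cases hx : x ∈ s
    · have hadd : PySem.Set.add s x = s := by
        simp [PySem.Set.add, PySem.Set.contains, hx]
      rw [List.foldl_cons, hadd, ih, List.filter_cons]
      simp [hx]
    · have hadd : PySem.Set.add s x = s ++ [x] := by
        simp [PySem.Set.add, PySem.Set.contains, hx]
      rw [List.foldl_cons, hadd, ih, List.filter_cons_of_pos (by simpa using hx)]
      rw [sd, sd_filter, List.filter_filter, List.append_assoc, List.singleton_append]
      have hf : t.filter (fun y => decide (y ∉ s ++ [x]))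
          = t.filter (fun y => decide (y ≠ x) && decide (y ∉ s)) := by
        apply List.filter_congr
        intro a _
        by_cases h1 : a = x <;> by_cases h2 : a ∈ s <;> simp [h1, h2]
      rw [hf]

lemma sd_eq_foldl (L : List String) : List.foldl PySem.Set.add [] L = sd L := by
  rw [foldl_add_eq]
  simp

lemma sd_append (a b : List String) :
    sd (a ++ b) = sd a ++ sd (b.filter (fun y => decide (y ∉ a))) := by
  calc sd (a ++ b) = List.foldl PySem.Set.add [] (a ++ b) := (sd_eq_foldl _).symm
    _ = List.foldl PySem.Set.add (List.foldl PySem.Set.add [] a) b := List.foldl_append ..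
    _ = List.foldl PySem.Set.add (sd a) b := by rw [sd_eq_foldl]
    _ = sd a ++ sd (b.filter (fun y => decide (y ∉ sd a))) := foldl_add_eq ..
    _ = sd a ++ sd (b.filter (fun y => decide (y ∉ a))) := by
        congr 1
        congr 1
        apply List.filter_congr
        intro y _
        simp [mem_sd]

lemma filter_flatMap {α : Type} (X : List α) (g : α → List String) (q : String → Bool) :
    (X.flatMap g).filter q = X.flatMap (fun d => (g d).filter q) := by
  induction X with
  | nil => rfl
  | cons x X ih => simp [List.flatMap_cons, List.filter_append, ih]

lemma flatMap_filter_ne (g : String → List String) (x : String) (h : g x = []) :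
    ∀ (D : List String), (D.filter (fun y => decide (y ≠ x))).flatMap g = D.flatMap g := by
  intro D
  induction D with
  | nil => rfl
  | cons y D ih =>
    by_cases hy : y = x
    · subst hy
      rw [List.filter_cons_of_neg (by simp), List.flatMap_cons, h, List.nil_append, ih]
    · rw [List.filter_cons_of_pos (by simpa using hy), List.flatMap_cons, List.flatMap_cons, ih]

lemma sdf_aux : ∀ (n : Nat) (D : List String), D.length ≤ n → ∀ (g : String → List String),
    sd ((sd D).flatMap g) = sd (D.flatMap g) := by
  intro n
  induction n with
  | zero =>
    intro D hD g
    rw [List.eq_nil_of_length_eq_zero (Nat.le_zero.mp hD)]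
    rfl
  | succ n ih =>
    intro D hD g
    match D with
    | [] => rfl
    | x :: D' =>
      have hE : (D'.filter (fun y => decide (y ≠ x))).length ≤ n := by
        have h1 := List.length_filter_le (fun y => decide (y ≠ x)) D'
        simp only [List.length_cons, Nat.succ_le_succ_iff] at hD
        omega
      have hg1 : (g x).filter (fun y => decide (y ∉ g x)) = [] := by
        simp [List.filter_eq_nil_iff]
      calc sd ((sd (x :: D')).flatMap g)
          = sd ((x :: sd (D'.filter (fun y => decide (y ≠ x)))).flatMap g) := by
            rw [sd, sd_filter]
        _ = sd (g x ++ (sd (D'.filter (fun y => decide (y ≠ x)))).flatMap g) := by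
            rw [List.flatMap_cons]
        _ = sd (g x) ++ sd (((sd (D'.filter (fun y => decide (y ≠ x)))).flatMap g).filter
              (fun y => decide (y ∉ g x))) := sd_append ..
        _ = sd (g x) ++ sd ((sd (D'.filter (fun y => decide (y ≠ x)))).flatMap
              (fun d => (g d).filter (fun y => decide (y ∉ g x)))) := by
            rw [filter_flatMap]
        _ = sd (g x) ++ sd ((D'.filter (fun y => decide (y ≠ x))).flatMap
              (fun d => (g d).filter (fun y => decide (y ∉ g x)))) := by
            rw [ih _ hE]
        _ = sd (g x) ++ sd (D'.flatMap (fun d => (g d).filter (fun y => decide (y ∉ g x)))) := by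
            rw [flatMap_filter_ne _ x hg1]
        _ = sd (g x) ++ sd ((D'.flatMap g).filter (fun y => decide (y ∉ g x))) := by
            rw [filter_flatMap]
        _ = sd (g x ++ D'.flatMap g) := (sd_append ..).symm
        _ = sd ((x :: D').flatMap g) := by rw [List.flatMap_cons]

lemma sdf (D : List String) (g : String → List String) :
    sd ((sd D).flatMap g) = sd (D.flatMap g) :=
  sdf_aux D.length D le_rfl g

-- congruence of sd under append, both sides
lemma sd_append_congr_left {X Y : List String} (Z : List String) (h : sd X = sd Y) :
    sd (X ++ Z) = sd (Y ++ Z) := by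
  rw [sd_append, sd_append, h]
  congr 1
  congr 1
  apply List.filter_congr
  intro y _
  have : y ∈ X ↔ y ∈ Y := by rw [← mem_sd, h, mem_sd]
  simp [this]

lemma sd_append_congr_right (X : List String) {U V : List String} (h : sd U = sd V) :
    sd (X ++ U) = sd (X ++ V) := by
  rw [sd_append, sd_append]
  congr 1
  rw [← sd_filter, ← sd_filter, h]

lemma sd_append_filter_congr (X : List String) {U V : List String}
    (h : U.filter (fun y => decide (y ∉ X)) = V.filter (fun y => decide (y ∉ X))) :
    sd (X ++ U) = sd (X ++ V) := by
  rw [sd_append, sd_append, h]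

lemma sd_flatMap_congr {α : Type} (L : List α) (f g : α → List String)
    (h : ∀ x ∈ L, sd (f x) = sd (g x)) :
    sd (L.flatMap f) = sd (L.flatMap g) := by
  induction L with
  | nil => rfl
  | cons x L ih =>
    rw [List.flatMap_cons, List.flatMap_cons]
    calc sd (f x ++ L.flatMap f) = sd (g x ++ L.flatMap f) :=
          sd_append_congr_left _ (h x (List.mem_cons_self ..))
      _ = sd (g x ++ L.flatMap g) :=
          sd_append_congr_right _ (ih (fun y hy => h y (List.mem_cons_of_mem _ hy)))

-- ---------- A's two phases ----------

-- the list of all substrings string[i:j] in scan order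
def bigL (string : String) (min_substr_len : Int) : List String :=
  (PySem.List.pyRange 0 (PySem.Str.len string) 1).flatMap (fun i =>
    (PySem.List.pyRange (i + min_substr_len) (PySem.Str.len string + 1) 1).map
      (fun j => PySem.Str.slice string (some i) (some j)))

-- "0" in s or "1" in s
def pvDirty (s : String) : Bool := PySem.Str.isIn "0" s || PySem.Str.isIn "1" s

def stepA (s : List String) (sub : String) : List String :=
  if pvDirty sub then PySem.Set.union (PySem.Set.discard s sub) (pvPieces sub) else s

lemma foldl_foldl {β : Type} (f : β → String → β) (g : Int → Int → String)
    (inner : Int → List Int) : ∀ (outer : List Int) (init : β),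
    outer.foldl (fun s i => (inner i).foldl (fun s j => f s (g i j)) s) init
      = (outer.flatMap (fun i => (inner i).map (g i))).foldl f init := by
  intro outer
  induction outer with
  | nil => intro init; rfl
  | cons i outer ih =>
    intro init
    rw [List.foldl_cons, List.flatMap_cons, List.foldl_append, ih, List.foldl_map]

lemma union_nodup (t : List String) : ∀ (s : List String), s.Nodup →
    (List.foldl PySem.Set.add s t).Nodup := by
  induction t with
  | nil => intro s hs; exact hs
  | cons x t ih =>
    intro s hs
    rw [List.foldl_cons]
    apply ih
    by_cases hx : x ∈ s
    · simpa [PySem.Set.add, PySem.Set.contains, hx] using hs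
    · have : PySem.Set.add s x = s ++ [x] := by
        simp [PySem.Set.add, PySem.Set.contains, hx]
      rw [this]
      simp only [List.nodup_append, hs, List.nodup_cons, List.not_mem_nil, not_false_iff,
        List.nodup_nil, and_true, true_and]
      intro a ha b hb
      simp only [List.mem_singleton] at hb
      subst hb
      intro h
      exact hx (h ▸ ha)

-- ---------- the split machinery: splitD ----------
def digB (c : Char) : Bool := c == '0' || c == '1'

def splitD : List Char → List (List Char)
  | [] => [[]]
  | c :: l => if digB c then [] :: splitD l else (splitD l).modifyHead (fun p => c :: p)

lemma splitD_ne_nil : ∀ (l : List Char), splitD l ≠ [] := by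
  intro l
  induction l with
  | nil => simp [splitD]
  | cons c l ih =>
    rw [splitD]
    split_ifs
    · simp
    · match h : splitD l, ih with
      | p :: ps, _ => simp

lemma splitD_clean : ∀ (l : List Char), ∀ p ∈ splitD l, ∀ c ∈ p, digB c = false := by
  intro l
  induction l with
  | nil => intro p hp c hc; simp [splitD] at hp; subst hp; simp at hc
  | cons a l ih =>
    intro p hp c hc
    rw [splitD] at hp
    split_ifs at hp with ha
    · rcases List.mem_cons.mp hp with h | h
      · subst h; simp at hc
      · exact ih p h c hc
    · match hsp : splitD l, splitD_ne_nil l with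
      | q :: qs, _ =>
        rw [hsp] at hp
        simp only [List.modifyHead] at hp
        rcases List.mem_cons.mp hp with h | h
        · subst h
          rcases List.mem_cons.mp hc with h | h
          · subst h; exact eq_false_of_ne_true (by simpa using ha)
          · exact ih q (hsp ▸ List.mem_cons_self ..) c h
        · exact ih p (hsp ▸ List.mem_cons_of_mem _ h) c hc

lemma splitD_all_clean (l : List Char) (h : ∀ c ∈ l, digB c = false) : splitD l = [l] := by
  induction l with
  | nil => rfl
  | cons c l ih =>
    rw [splitD, if_neg (by simpa using h c (List.mem_cons_self ..)),
      ih (fun a ha => h a (List.mem_cons_of_mem _ ha))]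
    rfl

lemma splitD_clean_append (u : List Char) (d : Char) (v : List Char)
    (hu : ∀ c ∈ u, digB c = false) (hd : digB d = true) :
    splitD (u ++ d :: v) = u :: splitD v := by
  induction u with
  | nil => simp [splitD, hd]
  | cons a u ih =>
    rw [List.cons_append, splitD, if_neg (by simpa using hu a (List.mem_cons_self ..)),
      ih (fun c hc => hu c (List.mem_cons_of_mem _ hc))]
    rfl

lemma splitD_snoc (w : List Char) (c : Char) :
    splitD (w ++ [c]) = if digB c then splitD w ++ [[]]
      else (splitD w).dropLast ++ [((splitD w).getLastD []) ++ [c]] := by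
  induction w with
  | nil => by_cases h : digB c <;> simp [splitD, h]
  | cons a w ih =>
    simp only [List.cons_append, splitD]
    by_cases ha : digB a
    · rw [if_pos ha, if_pos ha, ih]
      by_cases hc : digB c
      · simp [hc]
      · rw [if_neg hc, if_neg hc]
        match hsp : splitD w, splitD_ne_nil w with
        | q :: qs, _ => simp [List.getLastD_cons]
    · rw [if_neg ha, if_neg ha, ih]
      by_cases hc : digB c
      · rw [if_pos hc, if_pos hc]
        match hsp : splitD w, splitD_ne_nil w with
        | q :: qs, _ => simp
      · rw [if_neg hc, if_neg hc]
        match hsp : splitD w, splitD_ne_nil w with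
        | [q], _ => simp
        | q :: q' :: qs, _ =>
          simp [List.getLastD_cons, List.dropLast_cons_of_ne_nil]

-- ---------- PySem bridges: replace / splitOn / pvPieces ----------
def phi (c : Char) : Char := if c == '0' then '1' else c

lemma replace_go_eq : ∀ (fuel : Nat) (l acc : List Char), l.length ≤ fuel →
    PySem.Chars.replace.go ['0'] ['1'] fuel l acc = acc.reverse ++ l.map phi := by
  intro fuel
  induction fuel with
  | zero =>
    intro l acc hl
    rw [List.eq_nil_of_length_eq_zero (Nat.le_zero.mp hl)]
    rw [PySem.Chars.replace.go]
    simp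
  | succ f ih =>
    intro l acc hl
    match l with
    | [] =>
      rw [PySem.Chars.replace.go]
      · simp
      · intros; omega
    | c :: t =>
      rw [PySem.Chars.replace.go]
      by_cases hc : c = '0'
      · rw [if_pos (by subst hc; simp [List.isPrefixOf])]
        rw [ih _ _ (by simpa using hl)]
        subst hc
        simp [phi]
      · rw [if_neg (by simp [List.isPrefixOf]; exact fun h => hc h.symm)]
        rw [ih _ _ (by simpa using Nat.le_of_succ_le_succ hl)]
        simp [phi, hc]

lemma replace_eq_map (cs : List Char) :
    PySem.Chars.replace cs ['0'] ['1'] = cs.map phi := by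
  rw [PySem.Chars.replace, if_neg (by decide), replace_go_eq cs.length cs [] le_rfl]
  simp

def splitD' : List Char → List (List Char)
  | [] => [[]]
  | c :: l => if c == '1' then [] :: splitD' l else (splitD' l).modifyHead (fun p => c :: p)

lemma splitD'_ne_nil : ∀ (l : List Char), splitD' l ≠ [] := by
  intro l
  induction l with
  | nil => simp [splitD']
  | cons c l ih =>
    rw [splitD']
    split_ifs
    · simp
    · match h : splitD' l, ih with
      | p :: ps, _ => simp

lemma splitOn_go_eq : ∀ (fuel : Nat) (l cur : List Char) (acc : List (List Char)),
    l.length < fuel →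
    PySem.Chars.splitOn.go ['1'] fuel l cur acc
      = acc.reverse ++ (splitD' l).modifyHead (fun p => cur.reverse ++ p) := by
  intro fuel
  induction fuel with
  | zero => intro l cur acc hl; omega
  | succ f ih =>
    intro l cur acc hl
    match l with
    | [] =>
      rw [PySem.Chars.splitOn.go]
      · simp [splitD']
      · intros; omega
    | c :: rest =>
      rw [PySem.Chars.splitOn.go]
      by_cases hc : c = '1'
      · rw [if_pos (by subst hc; simp [List.isPrefixOf])]
        rw [ih _ _ _ (by simp only [List.length_cons] at hl; simp; omega)]
        subst hc
        rw [splitD', if_pos (by simp)]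
        match hsp : splitD' rest, splitD'_ne_nil rest with
        | q :: qs, _ => simp
      · rw [if_neg (by simp [List.isPrefixOf]; exact fun h => hc h.symm)]
        rw [ih _ _ _ (by simp at hl; omega)]
        rw [splitD', if_neg (by simp [hc])]
        match hsp : splitD' rest, splitD'_ne_nil rest with
        | q :: qs, _ => simp

lemma splitOn_eq (u : List Char) : PySem.Chars.splitOn u ['1'] = splitD' u := by
  rw [PySem.Chars.splitOn, splitOn_go_eq (u.length + 1) u [] [] (by omega)]
  match hsp : splitD' u, splitD'_ne_nil u with
  | q :: qs, _ => simp

lemma splitD'_map_phi (l : List Char) : splitD' (l.map phi) = splitD l := by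
  induction l with
  | nil => rfl
  | cons c l ih =>
    rw [List.map_cons, splitD', splitD]
    by_cases h0 : c = '0'
    · rw [if_pos (by simp [phi, h0]), if_pos (by simp [digB, h0]), ih]
    · by_cases h1 : c = '1'
      · rw [if_pos (by simp [phi, h0, h1]), if_pos (by simp [digB, h1]), ih]
      · rw [if_neg (by simp [phi, h0, h1]), if_neg (by simp [digB, h0, h1])]
        have hphi : phi c = c := by simp [phi, h0]
        rw [hphi, ih]

-- K1: A's sub.replace("0","1").split("1") is splitD on the characters
lemma pvPieces_eq (sub : String) :
    pvPieces sub = (splitD sub.toList).map String.ofList := by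
  rw [pvPieces]
  congr 1
  rw [PySem.Str.replace, String.toList_ofList,
    show ("0" : String).toList = ['0'] from by decide,
    show ("1" : String).toList = ['1'] from by decide,
    replace_eq_map, splitOn_eq, splitD'_map_phi]

-- ---------- characters / windows / dirtiness ----------
def digAt (cs : List Char) (k : Nat) : Bool := ((cs[k]?).map digB).getD false

def WN (cs : List Char) (a b : Nat) : List Char := (cs.drop a).take (b - a)

lemma singleton_infix_iff_mem (a : Char) (l : List Char) : [a] <:+: l ↔ a ∈ l := by
  constructor
  · intro h; exact h.sublist.subset (List.mem_singleton_self _)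
  · intro h
    rcases List.append_of_mem h with ⟨s, t, rfl⟩
    exact ⟨s, t, by simp⟩

lemma pvDirty_iff (str : String) : pvDirty str = true ↔ ∃ c ∈ str.toList, digB c = true := by
  unfold pvDirty
  rw [Bool.or_eq_true, PySem.Str.isIn_iff_infix, PySem.Str.isIn_iff_infix,
    show ("0" : String).toList = ['0'] from by decide,
    show ("1" : String).toList = ['1'] from by decide,
    singleton_infix_iff_mem, singleton_infix_iff_mem]
  constructor
  · rintro (h | h)
    · exact ⟨'0', h, by decide⟩
    · exact ⟨'1', h, by decide⟩
  · rintro ⟨c, hc, hd⟩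
    have h01 : c = '0' ∨ c = '1' := by simpa [digB] using hd
    rcases h01 with h | h
    · left; rwa [h] at hc
    · right; rwa [h] at hc

lemma pvDirty_eq_false_iff (str : String) :
    pvDirty str = false ↔ ∀ c ∈ str.toList, digB c = false := by
  rw [← Bool.not_eq_true, pvDirty_iff]
  push_neg
  constructor
  · intro h c hc
    simpa using h c hc
  · intro h c hc
    simp [h c hc]

lemma pvDig_eq (s : String) (k : Int) (hk : 0 ≤ k) :
    pvDig s k = digAt s.toList k.toNat := by
  obtain ⟨n, rfl⟩ := Int.eq_ofNat_of_zero_le hk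
  rw [pvDig, digAt]
  norm_num [PySem.Str.pyGet?_natCast]
  rfl

lemma Wstr_toList (s : String) (a b : Int) (ha : 0 ≤ a) (hb : 0 ≤ b) :
    (PySem.Str.slice s (some a) (some b)).toList = WN s.toList a.toNat b.toNat := by
  rw [PySem.Str.slice, String.toList_ofList, PySem.Chars.slice_eq_listSlice,
    PySem.List.slice_toNat _ ha hb]
  rfl

lemma Wstr_eq_ofList (s : String) (a b : Int) (ha : 0 ≤ a) (hb : 0 ≤ b) :
    PySem.Str.slice s (some a) (some b) = String.ofList (WN s.toList a.toNat b.toNat) := by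
  rw [PySem.Str.slice, PySem.Chars.slice_eq_listSlice, PySem.List.slice_toNat _ ha hb]
  rfl

lemma WN_split (cs : List Char) (a q b : Nat) (h1 : a ≤ q) (h2 : q ≤ b) :
    WN cs a b = WN cs a q ++ WN cs q b := by
  unfold WN
  rw [show b - a = (q - a) + (b - q) by omega, List.take_add]
  congr 1
  rw [List.drop_drop, show a + (q - a) = q by omega]

lemma WN_single (cs : List Char) (q : Nat) (h : q < cs.length) :
    WN cs q (q + 1) = [cs[q]] := by
  unfold WN
  rw [show q + 1 - q = 1 by omega, List.drop_eq_getElem_cons h, List.take_succ_cons,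
    List.take_zero]

lemma WN_snoc (cs : List Char) (a b : Nat) (h1 : a ≤ b) (h2 : b < cs.length) :
    WN cs a (b + 1) = WN cs a b ++ [cs[b]] := by
  rw [WN_split cs a b (b + 1) h1 (by omega), WN_single cs b h2]

lemma mem_WN_iff (cs : List Char) (a b : Nat) (c : Char) :
    c ∈ WN cs a b ↔ ∃ k : Nat, a ≤ k ∧ k < b ∧ k < cs.length ∧ cs[k]? = some c := by
  unfold WN
  rw [List.mem_iff_getElem?]
  constructor
  · rintro ⟨k, hk⟩
    rw [List.getElem?_take] at hk
    split_ifs at hk with hlt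
    · rw [List.getElem?_drop] at hk
      have hlen : a + k < cs.length := (List.getElem?_eq_some_iff.mp hk).1
      exact ⟨a + k, by omega, by omega, hlen, hk⟩
  · rintro ⟨k, h1, h2, h3, h4⟩
    refine ⟨k - a, ?_⟩
    rw [List.getElem?_take, if_pos (by omega), List.getElem?_drop,
      show a + (k - a) = k by omega]
    exact h4

lemma dirty_WN_iff (s : String) (a b : Int) (ha : 0 ≤ a) (hb : 0 ≤ b) :
    pvDirty (PySem.Str.slice s (some a) (some b)) = true
      ↔ ∃ k : Nat, a.toNat ≤ k ∧ k < b.toNat ∧ digAt s.toList k = true := by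
  rw [pvDirty_iff, Wstr_toList s a b ha hb]
  constructor
  · rintro ⟨c, hc, hd⟩
    obtain ⟨k, h1, h2, h3, h4⟩ := (mem_WN_iff ..).mp hc
    exact ⟨k, h1, h2, by simp [digAt, h4, hd]⟩
  · rintro ⟨k, h1, h2, hd⟩
    rw [digAt] at hd
    match h4 : s.toList[k]? with
    | none => rw [h4] at hd; simp at hd
    | some c =>
      rw [h4] at hd
      simp only [Option.map_some, Option.getD_some] at hd
      exact ⟨c, (mem_WN_iff ..).mpr ⟨k, h1, h2, (List.getElem?_eq_some_iff.mp h4).1, h4⟩, hd⟩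

-- pvNext01 characterization
lemma pvNext01_spec (s : String) : ∀ (t : Int), 0 ≤ t → t ≤ PySem.Str.len s →
    t ≤ pvNext01 s t ∧ pvNext01 s t ≤ PySem.Str.len s
    ∧ (∀ k : Nat, t.toNat ≤ k → k < (pvNext01 s t).toNat → digAt s.toList k = false)
    ∧ (pvNext01 s t < PySem.Str.len s → digAt s.toList (pvNext01 s t).toNat = true) := by
  suffices H : ∀ (nf : Nat) (t : Int), (PySem.Str.len s - t).toNat = nf → 0 ≤ t →
      t ≤ PySem.Str.len s →
      t ≤ pvNext01 s t ∧ pvNext01 s t ≤ PySem.Str.len s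
      ∧ (∀ k : Nat, t.toNat ≤ k → k < (pvNext01 s t).toNat → digAt s.toList k = false)
      ∧ (pvNext01 s t < PySem.Str.len s → digAt s.toList (pvNext01 s t).toNat = true) by
    intro t ht hlen
    exact H _ t rfl ht hlen
  intro nf
  induction nf with
  | zero =>
    intro t hnf ht hlen
    have hteq : t = PySem.Str.len s := by omega
    rw [pvNext01, dif_neg (by omega)]
    refine ⟨le_rfl, hlen, ?_, by omega⟩
    intro k h1 h2
    omega
  | succ nf ih =>
    intro t hnf ht hlen
    rw [pvNext01]
    by_cases h : t < PySem.Str.len s ∧ pvDig s t = false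
    · rw [dif_pos h]
      obtain ⟨h1, h2, h3, h4⟩ := ih (t + 1) (by omega) (by omega) (by omega)
      refine ⟨by omega, h2, ?_, h4⟩
      intro k hk1 hk2
      by_cases hke : k = t.toNat
      · subst hke
        rw [← pvDig_eq s t ht]
        exact h.2
      · exact h3 k (by omega) hk2
    · rw [dif_neg h]
      refine ⟨le_rfl, hlen, ?_, ?_⟩
      · intro k h1 h2
        omega
      · intro hlt
        have : ¬ pvDig s t = false := fun hc => h ⟨hlt, hc⟩
        rw [← pvDig_eq s t ht]
        exact Bool.not_eq_false .. |>.mp this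

-- ---------- fold-shape lemmas for B ----------
lemma foldl_append_out {σ : Type} (f : List String × σ → Int → List String × σ)
    (emit : σ → Int → List String) (upd : σ → Int → σ)
    (hf : ∀ st k, f st k = (st.1 ++ emit st.2 k, upd st.2 k)) :
    ∀ (L : List Int) (acc : List String) (c : σ),
      L.foldl f (acc, c) = (acc ++ (L.foldl f ([], c)).1, (L.foldl f ([], c)).2) := by
  intro L
  induction L with
  | nil => intro acc c; simp
  | cons k L ih =>
    intro acc c
    rw [List.foldl_cons, List.foldl_cons, hf, hf]
    rw [ih (acc ++ emit c k) (upd c k), ih ([] ++ emit c k) (upd c k)]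
    simp

-- ---------- per-start-position closed forms for B ----------
def Ci (s : String) (m i : Int) : List String :=
  (PySem.List.pyRange (i + m) (pvNext01 s i + 1) 1).map
    (fun j => PySem.Str.slice s (some i) (some j))

def stepK (s : String) : List String × Int → Int → List String × Int :=
  fun pk k => if pvDig s k then (pk.1 ++ [PySem.Str.slice s (some pk.2) (some k)], k + 1) else pk

def stepJ (s : String) : List String × Int → Int → List String × Int :=
  fun pl j => if pvDig s (j - 1) then (pl.1 ++ [""], j - 1)
    else (pl.1 ++ [PySem.Str.slice s (some (pl.2 + 1)) (some j)], pl.2)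

def Pi (s : String) (m i : Int) : List String :=
  let n := PySem.Str.len s
  let t := pvNext01 s i
  let j0 := max (t + 1) (i + m)
  if t < n ∧ j0 ≤ n then
    let pk := (PySem.List.pyRange i j0 1).foldl
      (fun (pk : List String × Int) k =>
        if pvDig s k then (pk.1 ++ [PySem.Str.slice s (some pk.2) (some k)], k + 1)
        else pk) ([], i)
    let pieces := pk.1 ++ [PySem.Str.slice s (some pk.2) (some j0)]
    ((PySem.List.pyRange (j0 + 1) (n + 1) 1).foldl
      (fun (pl : List String × Int) j =>
        if pvDig s (j - 1) then (pl.1 ++ [""], j - 1)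
        else (pl.1 ++ [PySem.Str.slice s (some (pl.2 + 1)) (some j)], pl.2))
      (pieces, pk.2 - 1)).1
  else []

-- B's fold = the pair of flatMaps
lemma B_eq_flatMap (s : String) (m : Int) :
    get_substrs_alt s m
      = sd ((PySem.List.pyRange 0 (PySem.Str.len s) 1).flatMap (Ci s m)
          ++ (PySem.List.pyRange 0 (PySem.Str.len s) 1).flatMap (Pi s m)) := by
  have hfold : ∀ (L : List Int) (cp : List String × List String),
      L.foldl (fun (cp : List String × List String) i =>
        let t := pvNext01 s i
        let clean := (PySem.List.pyRange (i + m) (t + 1) 1).foldl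
          (fun cl j => cl ++ [PySem.Str.slice s (some i) (some j)]) cp.1
        let j0 := max (t + 1) (i + m)
        if t < PySem.Str.len s ∧ j0 ≤ PySem.Str.len s then
          let pk := (PySem.List.pyRange i j0 1).foldl
            (fun (pk : List String × Int) k =>
              if pvDig s k then (pk.1 ++ [PySem.Str.slice s (some pk.2) (some k)], k + 1)
              else pk)
            (cp.2, i)
          let pieces := pk.1 ++ [PySem.Str.slice s (some pk.2) (some j0)]
          let pl := (PySem.List.pyRange (j0 + 1) (PySem.Str.len s + 1) 1).foldl
            (fun (pl : List String × Int) j =>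
              if pvDig s (j - 1) then (pl.1 ++ [""], j - 1)
              else (pl.1 ++ [PySem.Str.slice s (some (pl.2 + 1)) (some j)], pl.2))
            (pieces, pk.2 - 1)
          (clean, pl.1)
        else (clean, cp.2)) cp
      = (cp.1 ++ L.flatMap (Ci s m), cp.2 ++ L.flatMap (Pi s m)) := by
    have hsingle : ∀ (g : Int → String) (L : List Int) (acc : List String),
        L.foldl (fun cl j => cl ++ [g j]) acc = acc ++ L.map g := by
      intro g L
      induction L with
      | nil => intro acc; simp
      | cons j L ih => intro acc; rw [List.foldl_cons, ih, List.map_cons]; simp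
    have hK : ∀ (st : List String × Int) (k : Int),
        (fun (pk : List String × Int) k =>
          if pvDig s k then (pk.1 ++ [PySem.Str.slice s (some pk.2) (some k)], k + 1)
          else pk) st k
        = (st.1 ++ (if pvDig s k then [PySem.Str.slice s (some st.2) (some k)] else []),
           (if pvDig s k then k + 1 else st.2)) := by
      intro st k
      cases st
      split_ifs with h <;> simp [h]
    have hJ : ∀ (st : List String × Int) (j : Int),
        (fun (pl : List String × Int) j =>
          if pvDig s (j - 1) then (pl.1 ++ [""], j - 1)
          else (pl.1 ++ [PySem.Str.slice s (some (pl.2 + 1)) (some j)], pl.2)) st j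
        = (st.1 ++ (if pvDig s (j - 1) then [""]
              else [PySem.Str.slice s (some (st.2 + 1)) (some j)]),
           (if pvDig s (j - 1) then j - 1 else st.2)) := by
      intro st j
      cases st
      split_ifs with h <;> simp [h]
    intro L
    induction L with
    | nil => intro cp; simp
    | cons i L ih =>
      intro cp
      rw [List.foldl_cons, List.flatMap_cons, List.flatMap_cons]
      simp only
      rw [hsingle]
      by_cases hc : pvNext01 s i < PySem.Str.len s
          ∧ max (pvNext01 s i + 1) (i + m) ≤ PySem.Str.len s
      · rw [if_pos hc]
        rw [foldl_append_out _
          (fun c k => if pvDig s k then [PySem.Str.slice s (some c) (some k)] else [])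
          (fun c k => if pvDig s k then k + 1 else c) hK
          (PySem.List.pyRange i (max (pvNext01 s i + 1) (i + m)) 1) cp.2 i]
        rw [foldl_append_out _
          (fun c j => if pvDig s (j - 1) then [""]
            else [PySem.Str.slice s (some (c + 1)) (some j)])
          (fun c j => if pvDig s (j - 1) then j - 1 else c) hJ
          (PySem.List.pyRange (max (pvNext01 s i + 1) (i + m) + 1) (PySem.Str.len s + 1) 1)]
        rw [ih]
        have hPi : Pi s m i
            = (((PySem.List.pyRange i (max (pvNext01 s i + 1) (i + m)) 1).foldl
                  (fun (pk : List String × Int) k =>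
                    if pvDig s k then (pk.1 ++ [PySem.Str.slice s (some pk.2) (some k)], k + 1)
                    else pk) ([], i)).1
                ++ [PySem.Str.slice s
                    (some ((PySem.List.pyRange i (max (pvNext01 s i + 1) (i + m)) 1).foldl
                      (fun (pk : List String × Int) k =>
                        if pvDig s k then
                          (pk.1 ++ [PySem.Str.slice s (some pk.2) (some k)], k + 1)
                        else pk) ([], i)).2)
                    (some (max (pvNext01 s i + 1) (i + m)))])
              ++ ((PySem.List.pyRange (max (pvNext01 s i + 1) (i + m) + 1)
                    (PySem.Str.len s + 1) 1).foldl
                  (fun (pl : List String × Int) j =>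
                    if pvDig s (j - 1) then (pl.1 ++ [""], j - 1)
                    else (pl.1 ++ [PySem.Str.slice s (some (pl.2 + 1)) (some j)], pl.2))
                  ([], ((PySem.List.pyRange i (max (pvNext01 s i + 1) (i + m)) 1).foldl
                    (fun (pk : List String × Int) k =>
                      if pvDig s k then
                        (pk.1 ++ [PySem.Str.slice s (some pk.2) (some k)], k + 1)
                      else pk) ([], i)).2 - 1)).1 := by
          rw [Pi]
          simp only [if_pos hc]
          rw [foldl_append_out _
            (fun c j => if pvDig s (j - 1) then [""]
              else [PySem.Str.slice s (some (c + 1)) (some j)])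
            (fun c j => if pvDig s (j - 1) then j - 1 else c) hJ]
        rw [hPi, Ci]
        simp [List.append_assoc]
      · rw [if_neg hc, ih]
        have hPi : Pi s m i = [] := by
          rw [Pi]
          simp only [if_neg hc]
        rw [hPi, Ci]
        simp [List.append_assoc]
  rw [get_substrs_alt]
  simp only
  rw [hfold]
  rw [show PySem.Set.ofList
      (([] ++ (PySem.List.pyRange 0 (PySem.Str.len s) 1).flatMap (Ci s m))
        ++ ([] ++ (PySem.List.pyRange 0 (PySem.Str.len s) 1).flatMap (Pi s m)))
    = List.foldl PySem.Set.add []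
      (((PySem.List.pyRange 0 (PySem.Str.len s) 1).flatMap (Ci s m))
        ++ ((PySem.List.pyRange 0 (PySem.Str.len s) 1).flatMap (Pi s m))) from by
      simp [PySem.Set.ofList, PySem.Set.empty]]
  rw [sd_eq_foldl]

-- ---------- stage 1: A = sd (cleans ++ pieces of dirties) ----------
lemma pvPieces_clean (sub : String) : ∀ p ∈ pvPieces sub, pvDirty p = false := by
  intro p hp
  rw [pvPieces_eq] at hp
  rcases List.mem_map.mp hp with ⟨cs, hcs, rfl⟩
  rw [pvDirty_eq_false_iff]
  intro c hc
  rw [String.toList_ofList] at hc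
  exact splitD_clean _ cs hcs c hc

set_option maxHeartbeats 1000000 in
lemma phase2 : ∀ (M pre D : List String),
    (pre ++ M ++ D).Nodup →
    (∀ x ∈ pre, pvDirty x = false) → (∀ x ∈ D, pvDirty x = false) →
    M.foldl stepA (pre ++ M ++ D)
      = List.foldl PySem.Set.add (pre ++ M.filter (fun s => !pvDirty s) ++ D)
          ((M.filter pvDirty).flatMap pvPieces) := by
  intro M
  induction M with
  | nil => intro pre D _ _ _; simp
  | cons x M ih =>
    intro pre D hnd hpre hD
    by_cases hdx : pvDirty x
    · -- x contains '0' or '1': it is removed and its pieces are appended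
      have hnd' : (x :: (pre ++ (M ++ D))).Nodup := by
        apply List.nodup_middle.mp
        simpa [List.append_assoc] using hnd
      rw [List.nodup_cons] at hnd'
      have hx_pre : x ∉ pre := fun h => hnd'.1 (by simp [h])
      have hx_M : x ∉ M := fun h => hnd'.1 (by simp [h])
      have hx_D : x ∉ D := fun h => hnd'.1 (by simp [h])
      have hstep : stepA (pre ++ (x :: M) ++ D) x
          = List.foldl PySem.Set.add (pre ++ M ++ D) (pvPieces x) := by
        rw [stepA, if_pos hdx]
        have hdisc : PySem.Set.discard (pre ++ (x :: M) ++ D) x = pre ++ M ++ D := by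
          show List.filter _ _ = _
          rw [List.filter_append, List.filter_append, List.filter_cons_of_neg (by simp)]
          rw [List.filter_eq_self.mpr, List.filter_eq_self.mpr, List.filter_eq_self.mpr]
          · intro a ha; simp only [Bool.not_eq_eq_eq_not, Bool.not_true, beq_eq_false_iff_ne,
              ne_eq]; rintro rfl; exact hx_D ha
          · intro a ha; simp only [Bool.not_eq_eq_eq_not, Bool.not_true, beq_eq_false_iff_ne,
              ne_eq]; rintro rfl; exact hx_M ha
          · intro a ha; simp only [Bool.not_eq_eq_eq_not, Bool.not_true, beq_eq_false_iff_ne,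
              ne_eq]; rintro rfl; exact hx_pre ha
        rw [hdisc]
        rfl
      have hE := foldl_add_eq (pvPieces x) (pre ++ M ++ D)
      have hEclean : ∀ y ∈ sd ((pvPieces x).filter
          (fun y => decide (y ∉ pre ++ M ++ D))), pvDirty y = false := by
        intro y hy
        rw [mem_sd, List.mem_filter] at hy
        exact pvPieces_clean x y hy.1
      rw [List.foldl_cons, hstep, hE, List.append_assoc (pre ++ M)]
      rw [ih pre _ ?hnd hpre ?hDE]
      case hnd =>
        have := union_nodup (pvPieces x) (pre ++ M ++ D) (by
          have h2 := hnd'.2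
          simpa [List.append_assoc] using h2)
        rw [hE] at this
        simpa [List.append_assoc] using this
      case hDE =>
        intro y hy
        rcases List.mem_append.mp hy with hy | hy
        · exact hD y hy
        · exact hEclean y hy
      -- right-hand sides agree
      rw [List.filter_cons_of_neg (by simp [hdx]), List.filter_cons_of_pos (by simpa using hdx)]
      rw [List.flatMap_cons, List.foldl_append]
      rw [foldl_add_eq (pvPieces x) (pre ++ M.filter (fun s => !pvDirty s) ++ D)]
      have hfilt : (pvPieces x).filter (fun y => decide (y ∉ pre ++ M ++ D))
          = (pvPieces x).filter (fun y => decide (y ∉ pre ++ M.filter (fun s => !pvDirty s) ++ D)) := by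
        apply List.filter_congr
        intro y hy
        have hyc := pvPieces_clean x y hy
        have : y ∈ M ↔ y ∈ M.filter (fun s => !pvDirty s) := by
          rw [List.mem_filter]
          simp [hyc]
        simp only [List.mem_append, decide_eq_decide]
        rw [this]
      rw [← hfilt, List.append_assoc (pre ++ M.filter (fun s => !pvDirty s))]
    · -- x is free of '0'/'1': it stays where it is
      have hstep : stepA (pre ++ (x :: M) ++ D) x = pre ++ (x :: M) ++ D := by
        rw [stepA, if_neg (by simp [hdx])]
      have hre : pre ++ (x :: M) ++ D = (pre ++ [x]) ++ M ++ D := by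
        simp [List.append_assoc]
      rw [List.foldl_cons, hstep, hre]
      rw [ih (pre ++ [x]) D (by rw [← hre]; exact hnd) ?hpre hD]
      case hpre =>
        intro a ha
        rcases List.mem_append.mp ha with ha | ha
        · exact hpre a ha
        · rw [List.mem_singleton] at ha
          rw [ha]
          exact eq_false_of_ne_true (by simpa using hdx)
      rw [List.filter_cons_of_pos (by simp [hdx]), List.filter_cons_of_neg (by simpa using hdx)]
      simp [List.append_assoc]

set_option maxHeartbeats 1000000 in
lemma A_eq (s : String) (m : Int) :
    get_substrs s m
      = sd ((bigL s m).filter (fun x => !pvDirty x)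
          ++ ((bigL s m).filter pvDirty).flatMap pvPieces) := by
  have hA0 : get_substrs s m
      = List.foldl stepA
          ((PySem.List.pyRange 0 (PySem.Str.len s) 1).foldl (fun st i =>
            (PySem.List.pyRange (i + m) (PySem.Str.len s + 1) 1).foldl
              (fun st j => PySem.Set.add st (PySem.Str.slice s (some i) (some j))) st) [])
          ((PySem.List.pyRange 0 (PySem.Str.len s) 1).foldl (fun st i =>
            (PySem.List.pyRange (i + m) (PySem.Str.len s + 1) 1).foldl
              (fun st j => PySem.Set.add st (PySem.Str.slice s (some i) (some j))) st) []) := rfl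
  have hA1 : ((PySem.List.pyRange 0 (PySem.Str.len s) 1).foldl (fun st i =>
        (PySem.List.pyRange (i + m) (PySem.Str.len s + 1) 1).foldl
          (fun st j => PySem.Set.add st (PySem.Str.slice s (some i) (some j))) st)
        ([] : List String))
      = List.foldl PySem.Set.add [] (bigL s m) :=
    foldl_foldl PySem.Set.add (fun i j => PySem.Str.slice s (some i) (some j))
      (fun i => PySem.List.pyRange (i + m) (PySem.Str.len s + 1) 1)
      (PySem.List.pyRange 0 (PySem.Str.len s) 1) []
  rw [hA0, hA1, sd_eq_foldl]
  have hP2 := phase2 (sd (bigL s m)) [] []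
    (by simpa using sd_nodup (bigL s m)) (by simp) (by simp)
  simp only [List.nil_append, List.append_nil] at hP2
  rw [hP2, foldl_add_eq, sd_filter, sd_filter]
  rw [sd_append]
  refine congrArg (fun z => sd ((bigL s m).filter (fun x => !pvDirty x)) ++ z) ?_
  calc sd ((((sd ((bigL s m).filter pvDirty)).flatMap pvPieces)).filter
        (fun y => decide (y ∉ sd ((bigL s m).filter (fun x => !pvDirty x)))))
      = sd ((sd ((bigL s m).filter pvDirty)).flatMap
          (fun d => (pvPieces d).filter
            (fun y => decide (y ∉ sd ((bigL s m).filter (fun x => !pvDirty x)))))) := by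
        rw [filter_flatMap]
    _ = sd (((bigL s m).filter pvDirty).flatMap
          (fun d => (pvPieces d).filter
            (fun y => decide (y ∉ sd ((bigL s m).filter (fun x => !pvDirty x)))))) :=
        sdf ..
    _ = sd ((((bigL s m).filter pvDirty).flatMap pvPieces).filter
          (fun y => decide (y ∉ sd ((bigL s m).filter (fun x => !pvDirty x))))) := by
        rw [filter_flatMap]
    _ = sd ((((bigL s m).filter pvDirty).flatMap pvPieces).filter
          (fun y => decide (y ∉ (bigL s m).filter (fun x => !pvDirty x)))) := by
        congr 1
        apply List.filter_congr
        intro y _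
        simp [mem_sd]

-- ---------- stage 4: per-i rows ----------
lemma row_clean (s : String) (m i : Int) (hm : 0 ≤ m) (hi : 0 ≤ i)
    (hin : i < PySem.Str.len s) :
    ((PySem.List.pyRange (i + m) (PySem.Str.len s + 1) 1).map
        (fun j => PySem.Str.slice s (some i) (some j))).filter (fun x => !pvDirty x)
      = Ci s m i := by
  obtain ⟨hti, htn, hnd, hdt⟩ := pvNext01_spec s i hi (le_of_lt hin)
  rw [List.filter_map, Ci]
  congr 1
  by_cases hC : i + m ≤ pvNext01 s i + 1
  · rw [PySem.List.pyRange_one_append (i + m) (pvNext01 s i + 1) (PySem.Str.len s + 1) hC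
      (by omega), List.filter_append]
    rw [List.filter_eq_self.mpr ?h1, List.filter_eq_nil_iff.mpr ?h2, List.append_nil]
    case h1 =>
      intro j hj
      rw [PySem.List.mem_pyRange_one] at hj
      have hcl : pvDirty (PySem.Str.slice s (some i) (some j)) = false := by
        rw [← Bool.not_eq_true, dirty_WN_iff s i j hi (by omega)]
        rintro ⟨k, h1, h2, h3⟩
        have hf := hnd k (by omega) (by omega)
        rw [hf] at h3
        exact absurd h3 (by simp)
      simp [hcl]
    case h2 =>
      intro j hj
      rw [PySem.List.mem_pyRange_one] at hj
      have hdj : pvDirty (PySem.Str.slice s (some i) (some j)) = true :=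
        (dirty_WN_iff s i j hi (by omega)).mpr
          ⟨(pvNext01 s i).toNat, by omega, by omega, hdt (by omega)⟩
      simp [hdj]
  · rw [show PySem.List.pyRange (i + m) (pvNext01 s i + 1) 1 = ([] : List Int) from
      PySem.List.pyRange_one_eq_nil (by omega)]
    apply List.filter_eq_nil_iff.mpr
    intro j hj
    rw [PySem.List.mem_pyRange_one] at hj
    have hdj : pvDirty (PySem.Str.slice s (some i) (some j)) = true :=
      (dirty_WN_iff s i j hi (by omega)).mpr
        ⟨(pvNext01 s i).toNat, by omega, by omega, hdt (by omega)⟩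
    simp [hdj]

lemma row_dirty (s : String) (m i : Int) (hm : 0 ≤ m) (hi : 0 ≤ i)
    (hin : i < PySem.Str.len s) :
    ((PySem.List.pyRange (i + m) (PySem.Str.len s + 1) 1).map
        (fun j => PySem.Str.slice s (some i) (some j))).filter pvDirty
      = (PySem.List.pyRange (max (pvNext01 s i + 1) (i + m)) (PySem.Str.len s + 1) 1).map
          (fun j => PySem.Str.slice s (some i) (some j)) := by
  obtain ⟨hti, htn, hnd, hdt⟩ := pvNext01_spec s i hi (le_of_lt hin)
  rw [List.filter_map]
  congr 1
  by_cases hC : i + m ≤ pvNext01 s i + 1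
  · rw [PySem.List.pyRange_one_append (i + m) (pvNext01 s i + 1) (PySem.Str.len s + 1) hC
      (by omega), List.filter_append]
    rw [List.filter_eq_nil_iff.mpr ?h1, List.filter_eq_self.mpr ?h2, List.nil_append]
    case h1 =>
      intro j hj
      rw [PySem.List.mem_pyRange_one] at hj
      have hcl : pvDirty (PySem.Str.slice s (some i) (some j)) = false := by
        rw [← Bool.not_eq_true, dirty_WN_iff s i j hi (by omega)]
        rintro ⟨k, h1, h2, h3⟩
        have hf := hnd k (by omega) (by omega)
        rw [hf] at h3
        exact absurd h3 (by simp)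
      simp [hcl]
    case h2 =>
      intro j hj
      rw [PySem.List.mem_pyRange_one] at hj
      have hdj : pvDirty (PySem.Str.slice s (some i) (some j)) = true :=
        (dirty_WN_iff s i j hi (by omega)).mpr
          ⟨(pvNext01 s i).toNat, by omega, by omega, hdt (by omega)⟩
      simp [hdj]
    · rw [show max (pvNext01 s i + 1) (i + m) = pvNext01 s i + 1 by omega]
  · rw [show max (pvNext01 s i + 1) (i + m) = i + m by omega]
    apply List.filter_eq_self.mpr
    intro j hj
    rw [PySem.List.mem_pyRange_one] at hj
    have hdj : pvDirty (PySem.Str.slice s (some i) (some j)) = true :=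
      (dirty_WN_iff s i j hi (by omega)).mpr
        ⟨(pvNext01 s i).toNat, by omega, by omega, hdt (by omega)⟩
    simp [hdj]

-- ---------- stage 5: the first-window walk ----------
lemma digAt_lt (cs : List Char) (k : Nat) (h : k < cs.length) : digAt cs k = digB cs[k] := by
  simp [digAt, List.getElem?_eq_getElem h]

lemma clean_WN (cs : List Char) (a b : Nat)
    (h : ∀ k : Nat, a ≤ k → k < b → digAt cs k = false) :
    ∀ c ∈ WN cs a b, digB c = false := by
  intro c hc
  obtain ⟨k, h1, h2, h3, h4⟩ := (mem_WN_iff ..).mp hc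
  have := h k h1 h2
  rw [digAt, h4] at this
  simpa using this

lemma walk_spec (s : String) (j0 : Int) (hj0 : j0 ≤ PySem.Str.len s) :
    ∀ (nf : Nat) (q prev : Int) (acc : List String), (j0 - q).toNat = nf →
    0 ≤ prev → prev ≤ q → q ≤ j0 →
    (∀ k : Nat, prev.toNat ≤ k → k < q.toNat → digAt s.toList k = false) →
    let r := (PySem.List.pyRange q j0 1).foldl (stepK s) (acc, prev)
    r.1 ++ [PySem.Str.slice s (some r.2) (some j0)]
        = acc ++ (splitD (WN s.toList prev.toNat j0.toNat)).map String.ofList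
      ∧ prev ≤ r.2 ∧ r.2 ≤ j0
      ∧ (∀ k : Nat, r.2.toNat ≤ k → k < j0.toNat → digAt s.toList k = false)
      ∧ (r.2 = prev ∨ (prev < r.2 ∧ digAt s.toList (r.2 - 1).toNat = true)) := by
  have hcs : PySem.Str.len s = (s.toList.length : Int) := by simp
  intro nf
  induction nf with
  | zero =>
    intro q prev acc hnf h0 hpq hqj hcl
    have hqe : q = j0 := by omega
    subst hqe
    rw [PySem.List.pyRange_one_eq_nil le_rfl]
    dsimp only [List.foldl_nil]
    refine ⟨?_, ?_, ?_, ?_, ?_⟩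
    · rw [splitD_all_clean _ (clean_WN _ _ _ hcl), List.map_singleton,
        Wstr_eq_ofList s prev q h0 (by omega)]
    · exact le_rfl
    · exact hpq
    · simpa using hcl
    · exact Or.inl rfl
  | succ nf ih =>
    intro q prev acc hnf h0 hpq hqj hcl
    have hq : q < j0 := by omega
    rw [PySem.List.pyRange_one_cons hq, List.foldl_cons]
    by_cases hd : pvDig s q
    · have hstep : stepK s (acc, prev) q = (acc ++ [PySem.Str.slice s (some prev) (some q)], q + 1) := by
        simp [stepK, hd]
      rw [hstep]
      obtain ⟨H1, H2, H3, H4, H5⟩ := ih (q + 1) (q + 1)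
        (acc ++ [PySem.Str.slice s (some prev) (some q)]) (by omega) (by omega) le_rfl
        (by omega) (by omega)
      have hdq : digAt s.toList q.toNat = true := by
        rw [← pvDig_eq s q (by omega)]
        exact hd
      have hqlen : q.toNat < s.toList.length := by omega
      refine ⟨?_, le_trans (by omega) H2, H3, H4, ?_⟩
      · rw [H1]
        have hW : WN s.toList prev.toNat j0.toNat
            = WN s.toList prev.toNat q.toNat
              ++ s.toList[q.toNat] :: WN s.toList (q + 1).toNat j0.toNat := by
          rw [WN_split s.toList prev.toNat q.toNat j0.toNat (by omega) (by omega),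
            WN_split s.toList q.toNat (q.toNat + 1) j0.toNat (by omega) (by omega),
            WN_single s.toList q.toNat hqlen,
            show (q + 1).toNat = q.toNat + 1 by omega]
          simp
        rw [hW, splitD_clean_append _ _ _ (clean_WN _ _ _ hcl)
          (by rw [← digAt_lt _ _ hqlen]; exact hdq)]
        rw [List.map_cons, Wstr_eq_ofList s prev q h0 (by omega)]
        simp [List.append_assoc]
      · right
        rcases H5 with h | h
        · rw [h]
          constructor
          · omega
          · rw [show (q + 1 - 1 : Int) = q by ring]
            exact hdq
        · exact ⟨by omega, h.2⟩
    · have hstep : stepK s (acc, prev) q = (acc, prev) := by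
        simp [stepK, hd]
      rw [hstep]
      have hdq : digAt s.toList q.toNat = false := by
        rw [← pvDig_eq s q (by omega)]
        simpa using hd
      obtain ⟨H1, H2, H3, H4, H5⟩ := ih (q + 1) prev acc (by omega) h0 (by omega) (by omega)
        (by
          intro k hk1 hk2
          by_cases hke : k = q.toNat
          · subst hke; exact hdq
          · exact hcl k hk1 (by omega))
      exact ⟨H1, H2, H3, H4, H5⟩

-- ---------- stage 6: widening windows renew only the final fragment ----------
lemma modifyHead_append (f : List Char → List Char) (L M : List (List Char)) (h : L ≠ []) :
    (L ++ M).modifyHead f = L.modifyHead f ++ M := by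
  cases L with
  | nil => exact absurd rfl h
  | cons x L => simp

lemma splitD_mid_clean (w : List Char) (d : Char) (v : List Char)
    (hd : digB d = true) (hv : ∀ c ∈ v, digB c = false) :
    splitD (w ++ d :: v) = splitD w ++ [v] := by
  induction w with
  | nil =>
    rw [List.nil_append]
    simp only [splitD]
    rw [if_pos hd, splitD_all_clean v hv]
    rfl
  | cons a w ih =>
    simp only [List.cons_append, splitD]
    by_cases ha : digB a
    · rw [if_pos ha, if_pos ha, ih]
      rfl
    · rw [if_neg ha, if_neg ha, ih, modifyHead_append _ _ _ (splitD_ne_nil w)]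

lemma ext_spec (s : String) (i : Int) (hi : 0 ≤ i) :
    ∀ (nf : Nat) (j : Int) (A B : List String) (last : Int),
    (PySem.Str.len s - j).toNat = nf →
    i ≤ j → j ≤ PySem.Str.len s → 0 ≤ last → i ≤ last → last < j →
    digAt s.toList last.toNat = true →
    (∀ k : Nat, (last + 1).toNat ≤ k → k < j.toNat → digAt s.toList k = false) →
    sd A = sd B →
    (∀ x ∈ (splitD (WN s.toList i.toNat j.toNat)).map String.ofList, x ∈ A) →
    sd (A ++ (PySem.List.pyRange (j + 1) (PySem.Str.len s + 1) 1).flatMap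
          (fun j' => (splitD (WN s.toList i.toNat j'.toNat)).map String.ofList))
      = sd (((PySem.List.pyRange (j + 1) (PySem.Str.len s + 1) 1).foldl (stepJ s) (B, last)).1) := by
  have hcs : PySem.Str.len s = (s.toList.length : Int) := by simp
  intro nf
  induction nf with
  | zero =>
    intro j A B last hnf hij hjn hl0 hil hlj hdl hnd hsd hsub
    rw [PySem.List.pyRange_one_eq_nil (by omega)]
    simp only [List.foldl_nil, List.flatMap_nil, List.append_nil]
    exact hsd
  | succ nf ih =>
    intro j A B last hnf hij hjn hl0 hil hlj hdl hnd hsd hsub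
    have hjlt : j < PySem.Str.len s := by omega
    have hjlen : j.toNat < s.toList.length := by omega
    rw [PySem.List.pyRange_one_cons (by omega), List.flatMap_cons, List.foldl_cons]
    have hWsnoc : WN s.toList i.toNat (j + 1).toNat
        = WN s.toList i.toNat j.toNat ++ [s.toList[j.toNat]] := by
      rw [show (j + 1).toNat = j.toNat + 1 by omega]
      exact WN_snoc s.toList i.toNat j.toNat (by omega) hjlen
    have hllen : last.toNat < s.toList.length := by omega
    have hsplit : splitD (WN s.toList i.toNat j.toNat)
        = splitD (WN s.toList i.toNat last.toNat) ++ [WN s.toList (last + 1).toNat j.toNat] := by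
      have h1 : WN s.toList i.toNat j.toNat
          = WN s.toList i.toNat last.toNat
            ++ s.toList[last.toNat] :: WN s.toList (last + 1).toNat j.toNat := by
        rw [WN_split s.toList i.toNat last.toNat j.toNat (by omega) (by omega),
          WN_split s.toList last.toNat (last.toNat + 1) j.toNat (by omega) (by omega),
          WN_single s.toList last.toNat hllen,
          show (last + 1).toNat = last.toNat + 1 by omega]
        simp
      rw [h1, splitD_mid_clean _ _ _ (by rw [← digAt_lt _ _ hllen]; exact hdl)
        (clean_WN _ _ _ (by
          intro k hk1 hk2
          exact hnd k hk1 (by omega)))]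
    by_cases hdj : digAt s.toList j.toNat = true
    · have hstep : stepJ s (B, last) (j + 1) = (B ++ [""], j) := by
        have hpd : pvDig s j = true := by
          rw [pvDig_eq s j (by omega)]
          exact hdj
        simp [stepJ, show (j + 1 - 1 : Int) = j by ring, hpd]
      rw [hstep]
      have hS1 : splitD (WN s.toList i.toNat (j + 1).toNat)
          = splitD (WN s.toList i.toNat j.toNat) ++ [[]] := by
        rw [hWsnoc, splitD_snoc, if_pos (by rw [← digAt_lt _ _ hjlen]; exact hdj)]
      rw [← List.append_assoc]
      have hres := ih (j + 1) (A ++ (splitD (WN s.toList i.toNat (j + 1).toNat)).map String.ofList)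
        (B ++ [""]) j (by omega) (by omega) (by omega) (by omega) (by omega) (by omega) hdj
        (by intro k hk1 hk2; omega)
        (by
          calc sd (A ++ (splitD (WN s.toList i.toNat (j + 1).toNat)).map String.ofList)
              = sd (A ++ [""]) := by
                apply sd_append_filter_congr
                rw [hS1, List.map_append]
                rw [List.filter_append, List.filter_eq_nil_iff.mpr ?hin, List.nil_append]
                · rfl
                case hin =>
                  intro x hx
                  simp only [decide_eq_true_eq, not_not]
                  exact hsub x hx
            _ = sd (B ++ [""]) := sd_append_congr_left _ hsd)
        (by intro x hx; exact List.mem_append_right A hx)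
      exact hres
    · have hdjf : digAt s.toList j.toNat = false := by simpa using hdj
      have hstep : stepJ s (B, last) (j + 1)
          = (B ++ [PySem.Str.slice s (some (last + 1)) (some (j + 1))], last) := by
        have hpd : pvDig s j = false := by
          rw [pvDig_eq s j (by omega)]
          exact hdjf
        simp [stepJ, show (j + 1 - 1 : Int) = j by ring, hpd]
      rw [hstep]
      have hS1 : splitD (WN s.toList i.toNat (j + 1).toNat)
          = splitD (WN s.toList i.toNat last.toNat)
            ++ [WN s.toList (last + 1).toNat (j + 1).toNat] := by
        rw [hWsnoc, splitD_snoc, if_neg (by rw [← digAt_lt _ _ hjlen]; simp [hdjf]),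
          hsplit, List.dropLast_concat, List.getLastD_concat]
        congr 1
        rw [show (j + 1).toNat = j.toNat + 1 by omega]
        rw [← WN_snoc s.toList (last + 1).toNat j.toNat (by omega) hjlen]
      have hnewp : PySem.Str.slice s (some (last + 1)) (some (j + 1))
          = String.ofList (WN s.toList (last + 1).toNat (j + 1).toNat) :=
        Wstr_eq_ofList s (last + 1) (j + 1) (by omega) (by omega)
      rw [← List.append_assoc]
      have hres := ih (j + 1) (A ++ (splitD (WN s.toList i.toNat (j + 1).toNat)).map String.ofList)
        (B ++ [PySem.Str.slice s (some (last + 1)) (some (j + 1))]) last (by omega) (by omega)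
        (by omega) hl0 hil (by omega) hdl
        (by
          intro k hk1 hk2
          by_cases hke : k = j.toNat
          · subst hke; exact hdjf
          · exact hnd k hk1 (by omega))
        (by
          calc sd (A ++ (splitD (WN s.toList i.toNat (j + 1).toNat)).map String.ofList)
              = sd (A ++ [PySem.Str.slice s (some (last + 1)) (some (j + 1))]) := by
                apply sd_append_filter_congr
                rw [hS1, List.map_append]
                rw [List.filter_append, List.filter_eq_nil_iff.mpr ?hin, List.nil_append,
                  List.map_singleton, ← hnewp]
                case hin =>
                  intro x hx
                  simp only [decide_eq_true_eq, not_not]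
                  apply hsub
                  rw [hsplit, List.map_append]
                  exact List.mem_append_left _ hx
            _ = sd (B ++ [PySem.Str.slice s (some (last + 1)) (some (j + 1))]) :=
              sd_append_congr_left _ hsd)
        (by intro x hx; exact List.mem_append_right A hx)
      exact hres

lemma flatMap_congr_mem {α : Type} (L : List α) (f g : α → List String)
    (h : ∀ x ∈ L, f x = g x) : L.flatMap f = L.flatMap g := by
  induction L with
  | nil => rfl
  | cons x L ih =>
    rw [List.flatMap_cons, List.flatMap_cons, h x (List.mem_cons_self ..),
      ih (fun y hy => h y (List.mem_cons_of_mem _ hy))]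

-- ---------- per-i pieces equivalence ----------
lemma pieces_i (s : String) (m i : Int) (hm : 0 ≤ m) (hi : 0 ≤ i)
    (hin : i < PySem.Str.len s) :
    sd ((PySem.List.pyRange (max (pvNext01 s i + 1) (i + m)) (PySem.Str.len s + 1) 1).flatMap
          (fun j => pvPieces (PySem.Str.slice s (some i) (some j))))
      = sd (Pi s m i) := by
  have hcs : PySem.Str.len s = (s.toList.length : Int) := by simp
  obtain ⟨hti, htn, hnd0, hdt⟩ := pvNext01_spec s i hi (le_of_lt hin)
  by_cases hc : pvNext01 s i < PySem.Str.len s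
      ∧ max (pvNext01 s i + 1) (i + m) ≤ PySem.Str.len s
  · rw [Pi]
    simp only [if_pos hc]
    rw [show (fun (pk : List String × Int) k =>
        if pvDig s k then (pk.1 ++ [PySem.Str.slice s (some pk.2) (some k)], k + 1)
        else pk) = stepK s from rfl,
      show (fun (pl : List String × Int) j =>
        if pvDig s (j - 1) then (pl.1 ++ [""], j - 1)
        else (pl.1 ++ [PySem.Str.slice s (some (pl.2 + 1)) (some j)], pl.2)) = stepJ s from rfl]
    obtain ⟨W1, W2, W3, W4, W5⟩ := walk_spec s (max (pvNext01 s i + 1) (i + m)) (by omega)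
      (max (pvNext01 s i + 1) (i + m) - i).toNat i i [] rfl hi le_rfl (by omega) (by omega)
    rw [List.nil_append] at W1
    have htd : digAt s.toList (pvNext01 s i).toNat = true := hdt hc.1
    have hW5 : i < ((PySem.List.pyRange i (max (pvNext01 s i + 1) (i + m)) 1).foldl (stepK s)
          ([], i)).2
        ∧ digAt s.toList (((PySem.List.pyRange i (max (pvNext01 s i + 1) (i + m)) 1).foldl
          (stepK s) ([], i)).2 - 1).toNat = true := by
      rcases W5 with h | h
      · exfalso
        have hfalse := W4 (pvNext01 s i).toNat (by omega) (by omega)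
        rw [hfalse] at htd
        exact absurd htd (by simp)
      · exact h
    have hpvrest : (PySem.List.pyRange (max (pvNext01 s i + 1) (i + m) + 1)
          (PySem.Str.len s + 1) 1).flatMap
          (fun j => pvPieces (PySem.Str.slice s (some i) (some j)))
        = (PySem.List.pyRange (max (pvNext01 s i + 1) (i + m) + 1)
          (PySem.Str.len s + 1) 1).flatMap
          (fun j => (splitD (WN s.toList i.toNat j.toNat)).map String.ofList) := by
      apply flatMap_congr_mem
      intro j hj
      rw [PySem.List.mem_pyRange_one] at hj
      rw [pvPieces_eq, Wstr_toList s i j hi (by omega)]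
    rw [PySem.List.pyRange_one_cons (show max (pvNext01 s i + 1) (i + m)
        < PySem.Str.len s + 1 by omega), List.flatMap_cons, hpvrest,
      pvPieces_eq, Wstr_toList s i (max (pvNext01 s i + 1) (i + m)) hi (by omega)]
    have hfin := ext_spec s i hi ((PySem.Str.len s) - max (pvNext01 s i + 1) (i + m)).toNat
      (max (pvNext01 s i + 1) (i + m))
      ((splitD (WN s.toList i.toNat (max (pvNext01 s i + 1) (i + m)).toNat)).map String.ofList)
      (((PySem.List.pyRange i (max (pvNext01 s i + 1) (i + m)) 1).foldl (stepK s) ([], i)).1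
        ++ [PySem.Str.slice s
            (some (((PySem.List.pyRange i (max (pvNext01 s i + 1) (i + m)) 1).foldl (stepK s)
              ([], i)).2))
            (some (max (pvNext01 s i + 1) (i + m)))])
      (((PySem.List.pyRange i (max (pvNext01 s i + 1) (i + m)) 1).foldl (stepK s) ([], i)).2 - 1)
      rfl (by omega) (by omega) (by omega) (by omega) (by omega) hW5.2
      (by
        intro k hk1 hk2
        exact W4 k (by omega) (by omega))
      (by rw [W1])
      (by intro x hx; exact hx)
    exact hfin
  · have hnil : PySem.List.pyRange (max (pvNext01 s i + 1) (i + m)) (PySem.Str.len s + 1) 1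
        = [] := by
      rcases not_and_or.mp hc with h | h
      · exact PySem.List.pyRange_one_eq_nil (by omega)
      · exact PySem.List.pyRange_one_eq_nil (by omega)
    rw [hnil, Pi]
    simp only [if_neg hc]
    simp

-- ===== VERDICT (by name: the statement is the Claim_ definition above) =====
theorem get_substrs_spec : Claim_equal_get_substrs := by
  intro s m hdom hpre
  have hm : (0 : Int) ≤ m := hpre
  unfold Spec_get_substrs
  rw [A_eq, B_eq_flatMap, bigL]
  rw [filter_flatMap, filter_flatMap, List.flatMap_assoc]
  have hclean : (PySem.List.pyRange 0 (PySem.Str.len s) 1).flatMap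
      (fun i => ((PySem.List.pyRange (i + m) (PySem.Str.len s + 1) 1).map
        (fun j => PySem.Str.slice s (some i) (some j))).filter (fun x => !pvDirty x))
      = (PySem.List.pyRange 0 (PySem.Str.len s) 1).flatMap (Ci s m) := by
    apply flatMap_congr_mem
    intro i hi
    rw [PySem.List.mem_pyRange_one] at hi
    exact row_clean s m i hm hi.1 hi.2
  have hdirty : ∀ i ∈ PySem.List.pyRange 0 (PySem.Str.len s) 1,
      (((PySem.List.pyRange (i + m) (PySem.Str.len s + 1) 1).map
        (fun j => PySem.Str.slice s (some i) (some j))).filter pvDirty).flatMap pvPieces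
      = (PySem.List.pyRange (max (pvNext01 s i + 1) (i + m)) (PySem.Str.len s + 1) 1).flatMap
          (fun j => pvPieces (PySem.Str.slice s (some i) (some j))) := by
    intro i hi
    rw [PySem.List.mem_pyRange_one] at hi
    rw [row_dirty s m i hm hi.1 hi.2, List.flatMap_map]
  rw [hclean, flatMap_congr_mem _ _ _ hdirty]
  apply sd_append_congr_right
  apply sd_flatMap_congr
  intro i hi
  rw [PySem.List.mem_pyRange_one] at hi
  exact pieces_i s m i hm hi.1 hi.2
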